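-- pv_equiv track=rewrite | github.com/MadnessInnsmouth/football-manager-26-accessible | game_engine.py | rebalance_qualification_slots
-- ===== SOURCE A (Python) =====
-- def rebalance_qualification_slots(qualification, ranked_ids):
--     assigned = set()
--     ordered = {"champions_league": [], "europa_league": [], "conference_league": []}
--     for slot in ["champions_league", "europa_league", "conference_league"]:
--         for cid in qualification.get(slot, []):
--             if cid not in assigned:
--                 ordered[slot].append(cid)
--                 assigned.add(cid)
--     # top-up in league order where needed
--     targets = {"champions_league": len(qualification.get("champions_league", [])), "europa_league": len(qualification.get("europa_league", [])), "conference_league": len(qualification.get("conference_league", []))}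
--     for slot in ["champions_league", "europa_league", "conference_league"]:
--         for cid in ranked_ids:
--             if len(ordered[slot]) >= targets[slot]:
--                 break
--             if cid not in assigned:
--                 ordered[slot].append(cid)
--                 assigned.add(cid)
--     return ordered
-- ===== SOURCE B (Python) =====
-- def rebalance_qualification_slots(qualification, ranked_ids):
--     p0 = qualification.get("champions_league", [])
--     p1 = qualification.get("europa_league", [])
--     p2 = qualification.get("conference_league", [])
--
--     def fresh_after(items, prior):
--         prior_set = set(prior)
--         kept = []
--         kept_set = set()
--         for cid in items:
--             if cid not in prior_set and cid not in kept_set: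
--                 kept.append(cid)
--                 kept_set.add(cid)
--         return kept
--
--     b0 = fresh_after(p0, [])
--     b1 = fresh_after(p1, p0)
--     b2 = fresh_after(p2, p0 + p1)
--     fresh = fresh_after(ranked_ids, p0 + p1 + p2)
--     n0 = len(p0) - len(b0)
--     n1 = len(p1) - len(b1)
--     n2 = len(p2) - len(b2)
--     return {
--         "champions_league": b0 + fresh[:n0],
--         "europa_league": b1 + fresh[n0:n0 + n1],
--         "conference_league": b2 + fresh[n0 + n1:n0 + n1 + n2],
--     }
-- ===== Notes on version B (the rewrite author's own statement) =====
-- stated objective: alternative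
-- what changed: A's shared mutable assigned-set with three break-based rescans of ranked_ids is replaced by stateless per-slot look-back dedup against prefix concatenations plus one precomputed fresh list that is distributed to the slots by arithmetic slicing.
import Mathlib
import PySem

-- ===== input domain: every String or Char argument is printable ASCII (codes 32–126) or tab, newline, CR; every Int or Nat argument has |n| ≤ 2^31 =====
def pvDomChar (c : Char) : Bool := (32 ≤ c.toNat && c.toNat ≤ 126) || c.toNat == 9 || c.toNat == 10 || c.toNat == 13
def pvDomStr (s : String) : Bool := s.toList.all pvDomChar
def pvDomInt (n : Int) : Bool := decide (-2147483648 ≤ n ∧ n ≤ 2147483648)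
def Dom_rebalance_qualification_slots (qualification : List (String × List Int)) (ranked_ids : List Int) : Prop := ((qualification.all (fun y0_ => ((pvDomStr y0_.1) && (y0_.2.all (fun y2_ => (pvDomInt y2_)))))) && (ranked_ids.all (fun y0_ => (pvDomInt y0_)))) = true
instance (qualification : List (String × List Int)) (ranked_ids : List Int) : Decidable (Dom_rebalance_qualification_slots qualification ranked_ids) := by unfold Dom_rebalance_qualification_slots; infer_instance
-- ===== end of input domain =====

-- B replaces A's shared mutable set and three break-based rescans of ranked_ids by stateless
-- per-slot look-back dedup against prefix concatenations plus arithmetic slicing of a single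
-- precomputed fresh list; objective: alternative decomposition (same cost class on these sizes).


-- ===== PORT A =====
-- A's phase-1 loop for one slot: 'for cid in entries: if cid not in assigned: append; add'
def pvDedup (entries : List Int) (a : PySem.Set Int) (cur : List Int) : List Int × PySem.Set Int :=
  match entries with
  | [] => (cur, a)
  | c :: rest =>
    if c ∈ a then pvDedup rest a cur
    else pvDedup rest (PySem.Set.add a c) (cur ++ [c])

-- A's top-up loop for one slot: 'for cid in ranked_ids: if full: break; if cid not in assigned: append; add'
def pvFillA (ranked : List Int) (a : PySem.Set Int) (cur : List Int) (t : Nat) : List Int × PySem.Set Int :=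
  match ranked with
  | [] => (cur, a)
  | c :: rest =>
    if t ≤ cur.length then (cur, a)
    else if c ∈ a then pvFillA rest a cur t
    else pvFillA rest (PySem.Set.add a c) (cur ++ [c]) t

def rebalance_qualification_slots (qualification : List (String × List Int)) (ranked_ids : List Int) : List (String × List Int) :=
  let qCL := PySem.Dict.getD (PySem.Dict.mk qualification) "champions_league" []
  let qEL := PySem.Dict.getD (PySem.Dict.mk qualification) "europa_league" []
  let qEC := PySem.Dict.getD (PySem.Dict.mk qualification) "conference_league" []
  let d1 := pvDedup qCL PySem.Set.empty []
  let d2 := pvDedup qEL d1.2 []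
  let d3 := pvDedup qEC d2.2 []
  let r1 := pvFillA ranked_ids d3.2 d1.1 qCL.length
  let r2 := pvFillA ranked_ids r1.2 d2.1 qEL.length
  let r3 := pvFillA ranked_ids r2.2 d3.1 qEC.length
  [("champions_league", r1.1), ("europa_league", r2.1), ("conference_league", r3.1)]

-- ===== PORT B =====
-- B's helper fresh_after: ids of items not occurring in prior, first occurrences, in order
-- (kept_set mirrors kept for the O(1) membership test)
def pvFreshAfter (items prior : List Int) : List Int :=
  let priorSet := PySem.Set.ofList prior
  (items.foldl
    (fun (st : List Int × PySem.Set Int) cid =>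
      if cid ∉ priorSet ∧ cid ∉ st.2 then (st.1 ++ [cid], PySem.Set.add st.2 cid) else st)
    ([], PySem.Set.empty)).1

def rebalance_qualification_slots_alt (qualification : List (String × List Int)) (ranked_ids : List Int) : List (String × List Int) :=
  let p0 := PySem.Dict.getD (PySem.Dict.mk qualification) "champions_league" []
  let p1 := PySem.Dict.getD (PySem.Dict.mk qualification) "europa_league" []
  let p2 := PySem.Dict.getD (PySem.Dict.mk qualification) "conference_league" []
  let b0 := pvFreshAfter p0 []
  let b1 := pvFreshAfter p1 p0
  let b2 := pvFreshAfter p2 (p0 ++ p1)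
  let fresh := pvFreshAfter ranked_ids (p0 ++ p1 ++ p2)
  let n0 := p0.length - b0.length
  let n1 := p1.length - b1.length
  let n2 := p2.length - b2.length
  -- the slices fresh[:n0], fresh[n0:n0+n1], fresh[n0+n1:n0+n1+n2] are ported by hand as
  -- take/drop, exact because the bounds are nonnegative and increasing
  [("champions_league", b0 ++ fresh.take n0),
   ("europa_league", b1 ++ (fresh.drop n0).take n1),
   ("conference_league", b2 ++ (fresh.drop (n0 + n1)).take n2)]

-- ===== PRECONDITION & SPEC =====
def Spec_rebalance_qualification_slots (qualification : List (String × List Int)) (ranked_ids : List Int) (out : List (String × List Int)) : Prop := out = rebalance_qualification_slots_alt qualification ranked_ids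
instance (qualification : List (String × List Int)) (ranked_ids : List Int) (out : List (String × List Int)) : Decidable (Spec_rebalance_qualification_slots qualification ranked_ids out) := by unfold Spec_rebalance_qualification_slots; infer_instance

-- ===== CLAIM (what is proved, stated in full; the proofs are below) =====
def Claim_equal_rebalance_qualification_slots : Prop := ∀ (qualification : List (String × List Int)) (ranked_ids : List Int), Dom_rebalance_qualification_slots qualification ranked_ids → Spec_rebalance_qualification_slots qualification ranked_ids (rebalance_qualification_slots qualification ranked_ids)

-- ===== LEMMAS AND PROOFS =====

-- proof-only canonical "fresh stream": ids of r not in a, first occurrences, in order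
def pvF (r : List Int) (a : PySem.Set Int) : List Int :=
  match r with
  | [] => []
  | c :: rs => if c ∈ a then pvF rs a else c :: pvF rs (PySem.Set.add a c)

theorem pvDedup_fst (pool : List Int) (a : PySem.Set Int) (cur : List Int) :
    (pvDedup pool a cur).1 = cur ++ pvF pool a := by
  induction pool generalizing a cur with
  | nil => simp [pvDedup, pvF]
  | cons c rest ih =>
    by_cases hc : c ∈ a
    · simp [pvDedup, pvF, hc, ih]
    · simp [pvDedup, pvF, hc, ih]

theorem pvDedup_snd_mem (pool : List Int) (a : PySem.Set Int) (cur : List Int) (x : Int) :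
    x ∈ (pvDedup pool a cur).2 ↔ x ∈ a ∨ x ∈ pool := by
  induction pool generalizing a cur with
  | nil => simp [pvDedup]
  | cons c rest ih =>
    by_cases hc : c ∈ a
    · by_cases hx : x = c
      · subst hx; simp [pvDedup, ih, hc]
      · simp [pvDedup, hc, ih, hx]
    · simp [pvDedup, hc, ih]
      tauto

theorem pvF_length_le (r : List Int) (a : PySem.Set Int) : (pvF r a).length ≤ r.length := by
  induction r generalizing a with
  | nil => simp [pvF]
  | cons c rs ih =>
    by_cases hc : c ∈ a
    · simp only [pvF, if_pos hc]; exact Nat.le_succ_of_le (ih a)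
    · simp only [pvF, if_neg hc, List.length_cons]
      exact Nat.succ_le_succ (ih _)

-- B's fold equals the canonical stream when the set agrees with prior ++ accumulator
-- (and the mirror set agrees with the kept list)
theorem pvF_eq_foldl (r : List Int) (a priorSet : PySem.Set Int) (kept : List Int)
    (keptSet : PySem.Set Int) (hk : ∀ x, x ∈ keptSet ↔ x ∈ kept)
    (h : ∀ x, x ∈ a ↔ (x ∈ priorSet ∨ x ∈ kept)) :
    (r.foldl
      (fun (st : List Int × PySem.Set Int) cid =>
        if cid ∉ priorSet ∧ cid ∉ st.2 then (st.1 ++ [cid], PySem.Set.add st.2 cid) else st)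
      (kept, keptSet)).1 = kept ++ pvF r a := by
  induction r generalizing a kept keptSet with
  | nil => simp [pvF]
  | cons c rs ih =>
    by_cases hc : c ∈ a
    · have : ¬ (c ∉ priorSet ∧ c ∉ keptSet) := by
        have := (h c).1 hc; rw [hk c]; tauto
      simp only [List.foldl_cons, if_neg this, pvF, if_pos hc]
      exact ih a kept keptSet hk h
    · have hp : c ∉ priorSet ∧ c ∉ keptSet := by
        rw [hk c]; constructor <;> intro hmem <;> exact hc ((h c).2 (by tauto))
      simp only [List.foldl_cons, if_pos hp, pvF, if_neg hc]
      rw [ih (PySem.Set.add a c) (kept ++ [c]) (PySem.Set.add keptSet c)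
        (by intro x; rw [PySem.Set.mem_add]; simp [hk x])
        (by intro x; rw [PySem.Set.mem_add]; simp [h x]; tauto)]
      simp

theorem pvFreshAfter_eq (r : List Int) (a : PySem.Set Int) (prior : List Int)
    (h : ∀ x, x ∈ a ↔ x ∈ prior) : pvFreshAfter r prior = pvF r a := by
  unfold pvFreshAfter
  rw [pvF_eq_foldl r a (PySem.Set.ofList prior) [] PySem.Set.empty
    (by simp [PySem.Set.empty])
    (by intro x; rw [PySem.Set.mem_ofList]; simpa using h x)]
  simp

theorem pvMem_fillA_snd (r : List Int) (a : PySem.Set Int) (cur : List Int) (t : Nat)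
    (x : Int) (h : x ∈ a) : x ∈ (pvFillA r a cur t).2 := by
  induction r generalizing a cur with
  | nil => simpa [pvFillA] using h
  | cons c rs ih =>
    by_cases hf : t ≤ cur.length
    · simpa [pvFillA, hf] using h
    · by_cases hc : c ∈ a
      · simpa [pvFillA, hf, hc] using ih a cur h
      · simp only [pvFillA, if_neg hf, if_neg hc]
        exact ih _ _ ((PySem.Set.mem_add _ _ _).2 (Or.inl h))

-- A's top-up loop appends exactly a prefix of the fresh stream, and consumes it
theorem pvFillA_spec (r : List Int) (a : PySem.Set Int) (cur : List Int) (t : Nat)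
    (h : cur.length ≤ t) :
    (pvFillA r a cur t).1 = cur ++ (pvF r a).take (t - cur.length)
      ∧ pvF r (pvFillA r a cur t).2 = (pvF r a).drop (t - cur.length) := by
  induction r generalizing a cur with
  | nil => simp [pvFillA, pvF]
  | cons c rs ih =>
    by_cases hf : t ≤ cur.length
    · have ht : t - cur.length = 0 := by omega
      simp [pvFillA, hf, ht]
    · by_cases hc : c ∈ a
      · have := ih a cur h
        constructor
        · simpa [pvFillA, hf, hc, pvF, hc] using this.1
        · have hx : c ∈ (pvFillA rs a cur t).2 := pvMem_fillA_snd rs a cur t c hc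
          simp only [pvFillA, if_neg hf, pvF, if_pos hc, if_pos hx]
          exact this.2
      · have hlen : (cur ++ [c]).length ≤ t := by simp; omega
        have := ih (PySem.Set.add a c) (cur ++ [c]) hlen
        have hsub : t - cur.length = (t - (cur ++ [c]).length) + 1 := by simp; omega
        constructor
        · simp only [pvFillA, if_neg hf, if_neg hc, pvF, this.1, hsub, List.take_succ_cons]
          simp
        · have hx : c ∈ (pvFillA rs (PySem.Set.add a c) (cur ++ [c]) t).2 :=
            pvMem_fillA_snd rs _ _ t c ((PySem.Set.mem_add _ _ _).2 (Or.inr rfl))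
          simp only [pvFillA, if_neg hf, if_neg hc, pvF, if_pos hx, this.2, hsub,
            List.drop_succ_cons]

-- ===== VERDICT (by name: the statement is the Claim_ definition above) =====
theorem rebalance_qualification_slots_spec : Claim_equal_rebalance_qualification_slots := by
  intro qualification ranked_ids _
  unfold Spec_rebalance_qualification_slots
  unfold rebalance_qualification_slots rebalance_qualification_slots_alt
  set p0 := PySem.Dict.getD (PySem.Dict.mk qualification) "champions_league" [] with hp0
  set p1 := PySem.Dict.getD (PySem.Dict.mk qualification) "europa_league" [] with hp1
  set p2 := PySem.Dict.getD (PySem.Dict.mk qualification) "conference_league" [] with hp2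
  -- membership chains for the three assigned sets
  have m1 : ∀ x, x ∈ (pvDedup p0 PySem.Set.empty []).2 ↔ x ∈ p0 := by
    intro x; rw [pvDedup_snd_mem]; simp [PySem.Set.empty]
  have m2 : ∀ x, x ∈ (pvDedup p1 (pvDedup p0 PySem.Set.empty []).2 []).2 ↔ x ∈ p0 ++ p1 := by
    intro x; rw [pvDedup_snd_mem]; simp only [m1 x, List.mem_append]
  have m3 : ∀ x,
      x ∈ (pvDedup p2 (pvDedup p1 (pvDedup p0 PySem.Set.empty []).2 []).2 []).2 ↔
        x ∈ p0 ++ p1 ++ p2 := by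
    intro x; rw [pvDedup_snd_mem]; simp only [m2 x, List.mem_append]
  -- the three deduped buckets agree
  have e0 : pvFreshAfter p0 [] = (pvDedup p0 PySem.Set.empty []).1 := by
    rw [pvDedup_fst, pvFreshAfter_eq p0 PySem.Set.empty [] (by simp [PySem.Set.empty])]
    simp
  have e1 : pvFreshAfter p1 p0 = (pvDedup p1 (pvDedup p0 PySem.Set.empty []).2 []).1 := by
    rw [pvDedup_fst, pvFreshAfter_eq p1 _ p0 m1]; simp
  have e2 : pvFreshAfter p2 (p0 ++ p1)
      = (pvDedup p2 (pvDedup p1 (pvDedup p0 PySem.Set.empty []).2 []).2 []).1 := by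
    rw [pvDedup_fst, pvFreshAfter_eq p2 _ (p0 ++ p1) m2]; simp
  -- the fresh stream agrees
  have ef : pvFreshAfter ranked_ids (p0 ++ p1 ++ p2)
      = pvF ranked_ids (pvDedup p2 (pvDedup p1 (pvDedup p0 PySem.Set.empty []).2 []).2 []).2 :=
    pvFreshAfter_eq ranked_ids _ _ m3
  -- bucket lengths never exceed the targets
  have hl0 : (pvDedup p0 PySem.Set.empty []).1.length ≤ p0.length := by
    rw [pvDedup_fst]; simpa using pvF_length_le p0 PySem.Set.empty
  have hl1 : (pvDedup p1 (pvDedup p0 PySem.Set.empty []).2 []).1.length ≤ p1.length := by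
    rw [pvDedup_fst]; simpa using pvF_length_le p1 _
  have hl2 : (pvDedup p2 (pvDedup p1 (pvDedup p0 PySem.Set.empty []).2 []).2 []).1.length
      ≤ p2.length := by
    rw [pvDedup_fst]; simpa using pvF_length_le p2 _
  -- the three fills each append a prefix of the fresh stream and consume it
  obtain ⟨f1a, f1b⟩ := pvFillA_spec ranked_ids
    (pvDedup p2 (pvDedup p1 (pvDedup p0 PySem.Set.empty []).2 []).2 []).2
    (pvDedup p0 PySem.Set.empty []).1 p0.length hl0
  obtain ⟨f2a, f2b⟩ := pvFillA_spec ranked_ids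
    (pvFillA ranked_ids (pvDedup p2 (pvDedup p1 (pvDedup p0 PySem.Set.empty []).2 []).2 []).2
      (pvDedup p0 PySem.Set.empty []).1 p0.length).2 _ p1.length hl1
  obtain ⟨f3a, _⟩ := pvFillA_spec ranked_ids
    (pvFillA ranked_ids
      (pvFillA ranked_ids (pvDedup p2 (pvDedup p1 (pvDedup p0 PySem.Set.empty []).2 []).2 []).2
        (pvDedup p0 PySem.Set.empty []).1 p0.length).2
      (pvDedup p1 (pvDedup p0 PySem.Set.empty []).2 []).1 p1.length).2 _ p2.length hl2
  simp only [e0, e1, e2, ef, f1a, f2a, f3a, f1b, f2b, List.drop_drop]
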